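-- pv_equiv track=rewrite | github.com/Silvanaooo/26t1-comp9021-labs | Lab04 Solutions/ex_3_sol.py | f3_2
-- ===== SOURCE A (Python) =====
-- def f3_2(L: list) -> list:
--     """
--     Removes elements from a list where the element is the arithmetic mean of its neighbors.
--
--     Iterates through the list and removes any element that is equal to the average
--     of its immediate neighbors (i.e., where L[i] = (L[i-1] + L[i+1])/2).
--     Continues this process until no more elements can be removed.
--
--     :param L: A list of numbers
--     :return: The modified list with arithmetic mean elements removed
--     """
--     if len(L) < 3:
--         return L
--
--     while True:
--         removed = False
--         # scan from left to right, only interior indices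
--         for i in range(1, len(L) - 1):
--             if L[i - 1] + L[i + 1] == 2 * L[i]:
--                 L.pop(i)      # remove the leftmost such element
--                 removed = True
--                 break         # restart a new pass from the left
--         if not removed:
--             break
--     return L
-- ===== SOURCE B (Python) =====
-- def f3_2(L: list) -> list:
--     """Single left-to-right pass with a stack: before pushing each element,
--     pop the stack top while it is the mean of the second-top and the incoming
--     element. Mutates L in place (like A) and returns it."""
--     stack = []
--     for x in L:
--         while len(stack) >= 2 and stack[-2] + x == 2 * stack[-1]:
--             stack.pop()
--         stack.append(x)
--     L[:] = stack
--     return L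
-- ===== Notes on version B (the rewrite author's own statement) =====
-- stated objective: faster
-- what changed: Replaced A's repeated restart-from-the-left scan-and-pop passes over the whole list by a single left-to-right pass with a stack that pops the top while it is the mean of the second-top and the incoming element.
import Mathlib
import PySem

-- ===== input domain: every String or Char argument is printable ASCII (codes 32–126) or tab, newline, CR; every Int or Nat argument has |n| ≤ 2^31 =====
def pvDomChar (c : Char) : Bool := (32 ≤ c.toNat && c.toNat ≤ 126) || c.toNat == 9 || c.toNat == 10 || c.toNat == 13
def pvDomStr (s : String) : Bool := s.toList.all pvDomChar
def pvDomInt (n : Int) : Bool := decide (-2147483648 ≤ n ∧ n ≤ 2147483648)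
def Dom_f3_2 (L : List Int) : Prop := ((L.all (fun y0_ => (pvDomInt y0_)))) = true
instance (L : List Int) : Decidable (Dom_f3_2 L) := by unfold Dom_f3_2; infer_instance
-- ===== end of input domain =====

-- B replaces A's restart-from-the-left quadratic removal loop by a single
-- left-to-right pass with a stack (objective: faster, asymptotic).
-- Equivalence is about the RETURN value; both Pythons also mutate L in place
-- to the same final contents.

-- ===== PORT A =====
-- inner 'for i in range(1, len(L) - 1)' scan with break: the first interior
-- index whose element is the mean of its neighbours, or none.  L[i] ported as
-- L.getD i 0: every index scanned is in range (1 ≤ i, i + 1 < len), so getD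
-- is exact here.
def f3_2_find (L : List Int) : Option Nat :=
  (List.range' 1 (L.length - 2)).find?
    (fun i => decide (L.getD (i - 1) 0 + L.getD (i + 1) 0 = 2 * L.getD i 0))

-- 'while True: … L.pop(i) … break': remove the found index and restart; stop
-- when a full scan removed nothing.  L.pop(i) = L.take i ++ L.drop (i+1),
-- exact for the in-range i the scan returns.  Each iteration removes one
-- element, so L.length iterations always suffice: fuel is only a totality
-- guard, never reached.
def f3_2_loop (fuel : Nat) (L : List Int) : List Int :=
  match fuel with
  | 0 => L
  | fuel + 1 =>
    match f3_2_find L with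
    | none => L
    | some i => f3_2_loop fuel (L.take i ++ L.drop (i + 1))

def f3_2 (L : List Int) : List Int :=
  if L.length < 3 then L else f3_2_loop L.length L

-- ===== PORT B =====
-- 'while len(stack) >= 2 and stack[-2] + x == 2 * stack[-1]: stack.pop()'
-- followed by 'stack.append(x)'; the stack is kept top-first, so the final
-- result is reversed once at the end.
def f3_2_pushPop (st : List Int) (x : Int) : List Int :=
  match st with
  | t :: s :: rest => if s + x = 2 * t then f3_2_pushPop (s :: rest) x else x :: t :: s :: rest
  | _ => x :: st

def f3_2_alt (L : List Int) : List Int := (L.foldl f3_2_pushPop []).reverse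

-- ===== PRECONDITION & SPEC =====
def Spec_f3_2 (L : List Int) (out : List Int) : Prop := out = f3_2_alt L
instance (L : List Int) (out : List Int) : Decidable (Spec_f3_2 L out) := by unfold Spec_f3_2; infer_instance

-- ===== CLAIM (what is proved, stated in full; the proofs are below) =====
def Claim_equal_f3_2 : Prop := ∀ (L : List Int), Dom_f3_2 L → Spec_f3_2 L (f3_2 L)

-- ===== LEMMAS AND PROOFS =====

-- interior index j of L is removable
def pvCond (L : List Int) (j : Nat) : Prop :=
  L.getD (j - 1) 0 + L.getD (j + 1) 0 = 2 * L.getD j 0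

-- no interior element is the mean of its neighbours
def pvIrred (L : List Int) : Prop :=
  ∀ j : Nat, 1 ≤ j → j + 1 < L.length → ¬ pvCond L j

theorem find_none (L : List Int)
    (h : ∀ j, 1 ≤ j → j + 1 < L.length → ¬ pvCond L j) : f3_2_find L = none := by
  apply List.find?_eq_none.mpr
  intro j hj
  rw [List.mem_range'] at hj
  obtain ⟨i, hi, rfl⟩ := hj
  simpa [pvCond] using h (1 + i * 1) (by omega) (by omega)

-- find? over range' s n returns the least index satisfying p
theorem find?_range'_min (p : Nat → Bool) (s n j : Nat) (h1 : s ≤ j) (h2 : j < s + n)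
    (hp : p j = true) (hmin : ∀ k, s ≤ k → k < j → p k = false) :
    (List.range' s n).find? p = some j := by
  induction n generalizing s with
  | zero => omega
  | succ n ih =>
      rw [List.range'_succ, List.find?_cons]
      rcases Nat.eq_or_lt_of_le h1 with he | hlt
      · subst he; simp [hp]
      · rw [hmin s le_rfl hlt]
        exact ih (s + 1) hlt (by omega) (fun k hk => hmin k (by omega))

theorem find_some (L : List Int) (j : Nat) (hj : 1 ≤ j) (hlt : j + 1 < L.length)
    (hc : pvCond L j) (hmin : ∀ k, 1 ≤ k → k < j → ¬ pvCond L k) :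
    f3_2_find L = some j := by
  apply find?_range'_min _ 1 (L.length - 2) j hj (by omega)
  · simpa [pvCond] using hc
  · intro k hk1 hk2
    simpa [pvCond] using hmin k hk1 hk2

-- getD of an append, left part
theorem getD_append_left (A B : List Int) (k : Nat) (hk : k < A.length) :
    (A ++ B).getD k 0 = A.getD k 0 := by
  rw [List.getD_eq_getElem?_getD, List.getD_eq_getElem?_getD,
    List.getElem?_append_left hk]

theorem getD_append_len (A B : List Int) :
    (A ++ B).getD A.length 0 = B.getD 0 0 := by
  rw [List.getD_eq_getElem?_getD, List.getD_eq_getElem?_getD,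
    List.getElem?_append_right le_rfl, Nat.sub_self]

-- an irreducible list stays irreducible after dropping its last element
theorem pvIrred_prefix (A : List Int) (x : Int) (h : pvIrred (A ++ [x])) : pvIrred A := by
  intro j hj hlt hc
  apply h j hj (by simp; omega)
  unfold pvCond at hc ⊢
  rw [getD_append_left A [x] (j-1) (by omega), getD_append_left A [x] (j+1) hlt,
    getD_append_left A [x] j (by omega)]
  exact hc

-- pushing x keeps the (reversed) stack irreducible when the top triple is not removable
theorem pvIrred_push (st : List Int) (x : Int) (h : pvIrred st.reverse)
    (hx : ∀ t s rest, st = t :: s :: rest → s + x ≠ 2 * t) :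
    pvIrred (st.reverse ++ [x]) := by
  intro j hj hlt hc
  have hlen : st.reverse.length = st.length := st.length_reverse
  simp only [List.length_append, List.length_cons, List.length_nil, hlen] at hlt
  rcases Nat.lt_or_ge (j + 1) st.length with hin | hout
  · -- triple entirely inside st.reverse
    apply h j hj (by omega)
    unfold pvCond at hc ⊢
    rw [getD_append_left _ [x] (j-1) (by omega), getD_append_left _ [x] (j+1) (by omega),
      getD_append_left _ [x] j (by omega)] at hc
    exact hc
  · -- j + 1 = st.length : triple is (st[1], st[0], x)
    have hj1 : j + 1 = st.length := by omega
    match st, hx, hj1 with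
    | [], _, hj1 => simp at hj1
    | [a], _, hj1 => simp at hj1; omega
    | t :: s :: rest, hx, hj1 =>
      have hrev : (t :: s :: rest).reverse = (rest.reverse ++ [s]) ++ [t] := by simp
      have hlenA : ((rest.reverse ++ [s]) ++ [t]).length = rest.length + 2 := by simp
      unfold pvCond at hc
      have e1 : ((t :: s :: rest).reverse ++ [x]).getD (j-1) 0 = s := by
        rw [hrev, List.append_assoc, getD_append_left _ ([t] ++ [x]) (j-1) (by simp at hj1 ⊢; omega)]
        have : j - 1 = (rest.reverse ++ [s]).length - 1 := by simp at hj1 ⊢; omega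
        rw [this]
        simp
      have e2 : ((t :: s :: rest).reverse ++ [x]).getD j 0 = t := by
        have : j = (rest.reverse ++ [s]).length := by simp at hj1 ⊢; omega
        rw [hrev, List.append_assoc, this, getD_append_len]
        simp
      have e3 : ((t :: s :: rest).reverse ++ [x]).getD (j+1) 0 = x := by
        have : j + 1 = (t :: s :: rest).reverse.length := by simp at hj1 ⊢; omega
        rw [this, getD_append_len]
        simp
      rw [e1, e2, e3] at hc
      exact hx t s rest rfl (by linarith)

-- the junction triple values when the stack has at least two elements
theorem junction_getD (t s : Int) (st'' rest : List Int) (x : Int) :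
    ((t :: s :: st'').reverse ++ x :: rest).getD (st''.length + 1) 0 = t ∧
    ((t :: s :: st'').reverse ++ x :: rest).getD st''.length 0 = s ∧
    ((t :: s :: st'').reverse ++ x :: rest).getD (st''.length + 2) 0 = x := by
  have hrev : (t :: s :: st'').reverse = (st''.reverse ++ [s]) ++ [t] := by simp
  refine ⟨?_, ?_, ?_⟩
  · rw [hrev, List.append_assoc]
    have : st''.length + 1 = (st''.reverse ++ [s]).length := by simp
    rw [this, getD_append_len]; simp
  · rw [hrev, List.append_assoc, List.append_assoc]
    have : st''.length = st''.reverse.length := by simp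
    rw [this, getD_append_len]; simp
  · have : st''.length + 2 = (t :: s :: st'').reverse.length := by simp
    rw [this, getD_append_len]; simp

-- A's full scan on an irreducible stack ++ incoming finds exactly the junction
theorem find_junction (t s : Int) (st'' rest : List Int) (x : Int)
    (hirr : pvIrred (t :: s :: st'').reverse) (hc : s + x = 2 * t) :
    f3_2_find ((t :: s :: st'').reverse ++ x :: rest) = some (st''.length + 1) := by
  obtain ⟨e1, e2, e3⟩ := junction_getD t s st'' rest x
  apply find_some _ _ (by omega)
    (by simp only [List.length_append, List.length_reverse, List.length_cons]; omega)
  · unfold pvCond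
    have : st''.length + 1 - 1 = st''.length := by omega
    rw [this, e1, e2]
    have : st''.length + 1 + 1 = st''.length + 2 := by omega
    rw [this, e3]; linarith
  · intro k hk hklt hck
    apply hirr k hk (by simp; omega)
    unfold pvCond at hck ⊢
    have hl : (t :: s :: st'').reverse.length = st''.length + 2 := by simp
    rw [getD_append_left _ _ (k-1) (by omega), getD_append_left _ _ (k+1) (by omega),
      getD_append_left _ _ k (by omega)] at hck
    exact hck

-- removing index |A| from A ++ t :: B deletes t
theorem takedrop (A : List Int) (t : Int) (B : List Int) :
    (A ++ t :: B).take A.length ++ (A ++ t :: B).drop (A.length + 1) = A ++ B := by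
  induction A with
  | nil => simp
  | cons a A _ => simp

-- removing the junction index pops the stack top
theorem pop_junction (t s : Int) (st'' rest : List Int) (x : Int) :
    (((t :: s :: st'').reverse ++ x :: rest).take (st''.length + 1)) ++
      (((t :: s :: st'').reverse ++ x :: rest).drop (st''.length + 1 + 1)) =
    (s :: st'').reverse ++ x :: rest := by
  have hrev : (t :: s :: st'').reverse ++ x :: rest =
      (st''.reverse ++ [s]) ++ t :: x :: rest := by simp
  have hlen : st''.length + 1 = (st''.reverse ++ [s]).length := by simp
  rw [hrev, hlen, takedrop]
  simp

-- MAIN INVARIANT: running A's while-loop on (reversed stack) ++ remaining input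
-- equals finishing B's single pass, provided the stack is irreducible.
theorem main_push (fuel : Nat) (rest st : List Int) (x : Int)
    (h : pvIrred st.reverse)
    (hx : ∀ t s r, st = t :: s :: r → s + x ≠ 2 * t)
    (ih : ∀ st' : List Int, pvIrred st'.reverse → st'.length + rest.length ≤ fuel →
      f3_2_loop fuel (st'.reverse ++ rest) = (List.foldl f3_2_pushPop st' rest).reverse)
    (hstep : f3_2_pushPop st x = x :: st)
    (hfuel : st.length + (x :: rest).length ≤ fuel) :
    f3_2_loop fuel (st.reverse ++ x :: rest) = (List.foldl f3_2_pushPop st (x :: rest)).reverse := by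
  have hirr : pvIrred (x :: st).reverse := by
    rw [List.reverse_cons]
    exact pvIrred_push st x h hx
  have heq : st.reverse ++ x :: rest = (x :: st).reverse ++ rest := by simp
  rw [heq, ih (x :: st) hirr (by simp at hfuel ⊢; omega), List.foldl_cons, hstep]

-- with no removable triple the scan finds nothing and the loop stops at once
theorem loop_irred (fuel : Nat) (L : List Int) (h : pvIrred L) : f3_2_loop fuel L = L := by
  match fuel with
  | 0 => rfl
  | fuel + 1 =>
      rw [f3_2_loop]
      rw [find_none L (fun j hj hlt => h j hj hlt)]

-- MAIN INVARIANT: running A's while-loop on (reversed stack) ++ remaining input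
-- equals finishing B's single pass, provided the stack is irreducible and the
-- fuel covers every element still on either side.
theorem main_inv (fuel : Nat) (rest st : List Int) (h : pvIrred st.reverse)
    (hfuel : st.length + rest.length ≤ fuel) :
    f3_2_loop fuel (st.reverse ++ rest) = (List.foldl f3_2_pushPop st rest).reverse := by
  match rest with
  | [] =>
      rw [List.foldl_nil, List.append_nil]
      exact loop_irred fuel st.reverse h
  | x :: rest' =>
      match st with
      | [] =>
          exact main_push fuel rest' [] x h (by intro _ _ _ h'; cases h')
            (fun st' h' hf => main_inv fuel rest' st' h' hf) rfl hfuel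
      | [a] =>
          exact main_push fuel rest' [a] x h (by intro _ _ _ h'; cases h')
            (fun st' h' hf => main_inv fuel rest' st' h' hf) rfl hfuel
      | t :: s :: st'' =>
          by_cases hc : s + x = 2 * t
          · -- pop: A removes the junction element, B pops the stack
            match fuel, hfuel with
            | fuel + 1, hfuel =>
              rw [f3_2_loop]
              have hfind := find_junction t s st'' rest' x h hc
              rw [hfind]
              show f3_2_loop fuel (((t :: s :: st'').reverse ++ x :: rest').take (st''.length + 1) ++
                ((t :: s :: st'').reverse ++ x :: rest').drop (st''.length + 1 + 1)) =
                (List.foldl f3_2_pushPop (t :: s :: st'') (x :: rest')).reverse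
              have hidx : ((t :: s :: st'').reverse ++ x :: rest').take (st''.length + 1) ++
                  ((t :: s :: st'').reverse ++ x :: rest').drop (st''.length + 1 + 1) =
                  (s :: st'').reverse ++ x :: rest' := pop_junction t s st'' rest' x
              rw [hidx]
              have hpre : pvIrred (s :: st'').reverse := by
                apply pvIrred_prefix _ t
                rw [← List.reverse_cons]; exact h
              rw [main_inv fuel (x :: rest') (s :: st'') hpre (by simp at hfuel ⊢; omega)]
              have hstep : f3_2_pushPop (t :: s :: st'') x = f3_2_pushPop (s :: st'') x := by
                rw [f3_2_pushPop, if_pos hc]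
              rw [List.foldl_cons, List.foldl_cons, hstep]
          · exact main_push fuel rest' (t :: s :: st'') x h
              (by intro t' s' r' h' ; cases h'; exact hc)
              (fun st' h' hf => main_inv fuel rest' st' h' hf)
              (by rw [f3_2_pushPop, if_neg hc]) hfuel
termination_by (rest.length, st.length)

theorem alt_short (L : List Int) (h : L.length < 3) : f3_2_alt L = L := by
  match L, h with
  | [], _ => rfl
  | [a], _ => rfl
  | [a, b], _ => rfl

-- ===== VERDICT (by name: the statement is the Claim_ definition above) =====
theorem f3_2_spec : Claim_equal_f3_2 := by
  intro L _
  unfold Spec_f3_2 f3_2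
  split
  · exact (alt_short L (by omega)).symm
  · have h0 : pvIrred (([] : List Int).reverse) := by
      intro j hj hlt; simp at hlt
    have := main_inv L.length L [] h0 (by simp)
    simpa [f3_2_alt] using this
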